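-- pv_equiv track=rewrite | github.com/eordo/advent-of-code | day_04.py | part_2
-- ===== SOURCE A (Python) =====
-- def get_neighbors(x, y, max_x, max_y):
--     neighbor_coords = [
--         (x + dx, y + dy)
--         for dx, dy in [
--             (-1, -1), (-1, 0), (-1, 1), (0, 1),
--             (1, 1), (1, 0), (1, -1), (0, -1)
--         ]
--         if 0 <= x + dx < max_x and 0 <= y + dy < max_y
--     ]
--     return neighbor_coords
--
-- def is_accessible(neighbors_list, grid):
--     surrounding_count = sum(grid[x][y] == '@' for (x, y) in neighbors_list)
--     return surrounding_count < 4
--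
-- def part_2(grid):
--     m, n = len(grid), len(grid[0])
--     accessible_rolls = [
--         (x, y)
--         for x in range(m)
--         for y in range(n)
--         if grid[x][y] == '@' and is_accessible(get_neighbors(x, y, m, n), grid)
--     ]
--     roll_count = len(accessible_rolls)
--     if roll_count > 0:
--         for (x, y) in accessible_rolls:
--             grid[x][y] = '.'
--         roll_count += part_2(grid)
--     return roll_count
-- ===== SOURCE B (Python) =====
-- # B: iterative round-by-round peeling over a coordinate SET instead of re-scanning and
-- # rewriting the whole grid recursively; equivalence is about the RETURN value only
-- # (A mutates its grid argument in place, B leaves it untouched).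
-- _OFFS = ((-1, -1), (-1, 0), (-1, 1), (0, 1), (1, 1), (1, 0), (1, -1), (0, -1))
--
-- def part_2(grid):
--     m, n = len(grid), len(grid[0])
--     live = {(x, y) for x in range(m) for y in range(n) if grid[x][y] == '@'}
--     total = 0
--     while True:
--         removable = {(x, y) for (x, y) in live
--                      if sum((x + dx, y + dy) in live for dx, dy in _OFFS) < 4}
--         if not removable:
--             return total
--         total += len(removable)
--         live -= removable
-- ===== Notes on version B (the rewrite author's own statement) =====
-- stated objective: alternative
-- what changed: B replaces A's recursion that rescans and rewrites the whole m*n grid every round with an iterative loop that keeps only the set of remaining '@' coordinates, filters that set each round, and subtracts the peeled cells, never touching the grid again after one initial scan.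
import Mathlib
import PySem

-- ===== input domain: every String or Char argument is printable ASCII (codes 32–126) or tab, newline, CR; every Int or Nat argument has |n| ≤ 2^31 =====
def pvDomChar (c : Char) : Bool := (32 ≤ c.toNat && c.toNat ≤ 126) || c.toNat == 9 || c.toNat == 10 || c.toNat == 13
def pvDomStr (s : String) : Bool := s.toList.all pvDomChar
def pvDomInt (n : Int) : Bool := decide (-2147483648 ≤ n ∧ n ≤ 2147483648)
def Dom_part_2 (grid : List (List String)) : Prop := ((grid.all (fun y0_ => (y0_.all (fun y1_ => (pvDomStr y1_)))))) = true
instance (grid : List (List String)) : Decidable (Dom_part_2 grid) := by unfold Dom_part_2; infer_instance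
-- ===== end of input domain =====

-- B replaces A's recursive whole-grid rescan-and-rewrite with an iterative peel over a set
-- of '@' coordinates; equivalence is about the RETURN value only (Python A mutates its grid
-- argument in place, B leaves it untouched).

-- ===== PORT A =====
-- grid[x][y] (both Pythons read cells this way; total form, used only at indices where Python returns)
def pvCell (grid : List (List String)) (x y : Int) : String :=
  (PySem.List.pyGet? ((PySem.List.pyGet? grid x).getD []) y).getD ""

def get_neighbors (x y max_x max_y : Int) : List (Int × Int) :=
  (([(-1, -1), (-1, 0), (-1, 1), (0, 1), (1, 1), (1, 0), (1, -1), (0, -1)] : List (Int × Int)).filter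
    (fun d => decide (0 ≤ x + d.1) && decide (x + d.1 < max_x) &&
              decide (0 ≤ y + d.2) && decide (y + d.2 < max_y))).map
    (fun d => (x + d.1, y + d.2))

def is_accessible (neighbors_list : List (Int × Int)) (grid : List (List String)) : Bool :=
  decide (((neighbors_list.map
    (fun c => if pvCell grid c.1 c.2 == "@" then (1 : Int) else 0)).sum) < 4)

-- the nested comprehension building accessible_rolls
def pvARolls (grid : List (List String)) (m n : Int) : List (Int × Int) :=
  (PySem.List.pyRange 0 m 1).flatMap (fun x =>
    ((PySem.List.pyRange 0 n 1).filter (fun y =>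
      pvCell grid x y == "@" && is_accessible (get_neighbors x y m n) grid)).map (fun y => (x, y)))

-- grid[x][y] = '.'
def pvSetDot (grid : List (List String)) (c : Int × Int) : List (List String) :=
  PySem.List.pySetD grid c.1 (PySem.List.pySetD (PySem.List.pyGetD grid c.1 []) c.2 ".")

-- the recursion of part_2; fuel is only a totality guard (enough for every admitted input)
def pvARec (grid : List (List String)) (fuel : Nat) : Int :=
  match fuel with
  | 0 => 0
  | fuel' + 1 =>
    let m : Int := grid.length
    let n : Int := ((PySem.List.pyGet? grid 0).getD []).length
    let rolls := pvARolls grid m n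
    let cnt : Int := rolls.length
    if cnt > 0 then cnt + pvARec (rolls.foldl pvSetDot grid) fuel'
    else cnt

def part_2 (grid : List (List String)) : Int :=
  pvARec grid (grid.length * (grid.headD []).length + 1)

-- ===== PORT B =====
def pvOffs : List (Int × Int) := [(-1, -1), (-1, 0), (-1, 1), (0, 1), (1, 1), (1, 0), (1, -1), (0, -1)]

-- {(x,y) for (x,y) in live if sum((x+dx,y+dy) in live for dx,dy in _OFFS) < 4}
def pvBRemovable (live : PySem.Set (Int × Int)) : PySem.Set (Int × Int) :=
  PySem.Set.ofList (live.filter (fun c =>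
    decide (((pvOffs.map (fun d =>
      if PySem.Set.contains live (c.1 + d.1, c.2 + d.2) then (1 : Int) else 0)).sum) < 4)))

-- the while-loop; fuel is only a totality guard (enough for every admitted input)
def pvBLoop (live : PySem.Set (Int × Int)) (total : Int) (fuel : Nat) : Int :=
  match fuel with
  | 0 => total
  | fuel' + 1 =>
    let removable := pvBRemovable live
    if removable.isEmpty then total
    else pvBLoop (PySem.Set.diff live removable) (total + PySem.Set.len removable) fuel'

def part_2_alt (grid : List (List String)) : Int :=
  let m : Int := grid.length
  let n : Int := ((PySem.List.pyGet? grid 0).getD []).length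
  let live : PySem.Set (Int × Int) := PySem.Set.ofList
    ((PySem.List.pyRange 0 m 1).flatMap (fun x =>
      ((PySem.List.pyRange 0 n 1).filter (fun y => pvCell grid x y == "@")).map (fun y => (x, y))))
  pvBLoop live 0 (live.length + 1)

-- ===== PRECONDITION & SPEC =====
-- exactly where Python A returns: a nonempty grid (grid[0] is read) whose every row is at
-- least as long as row 0 (every grid[x][y] with y < len(grid[0]) is read)
def Pre_part_2 (grid : List (List String)) : Prop :=
  grid ≠ [] ∧ ∀ row ∈ grid, (grid.headD []).length ≤ row.length
instance (grid : List (List String)) : Decidable (Pre_part_2 grid) := by unfold Pre_part_2; infer_instance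

def pvWitness_part_2 : List (List String) := [["@", "."], [".", "@"]]

def Spec_part_2 (grid : List (List String)) (out : Int) : Prop := out = part_2_alt grid
instance (grid : List (List String)) (out : Int) : Decidable (Spec_part_2 grid out) := by unfold Spec_part_2; infer_instance

-- ===== CLAIM (what is proved, stated in full; the proofs are below) =====
def Claim_equal_part_2 : Prop := ∀ (grid : List (List String)), Dom_part_2 grid → Pre_part_2 grid → Spec_part_2 grid (part_2 grid)

-- ===== LEMMAS AND PROOFS =====

-- abbreviations for the dimensions A and B both read off the grid
def pvN (grid : List (List String)) : Int := ((PySem.List.pyGet? grid 0).getD []).length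
def pvCoords (grid : List (List String)) : List (Int × Int) :=
  PySem.List.pyRange 0 (grid.length : Int) 1 ×ˢ PySem.List.pyRange 0 (pvN grid) 1
def pvLiveL (grid : List (List String)) : List (Int × Int) :=
  (pvCoords grid).filter (fun c => pvCell grid c.1 c.2 == "@")
-- rows are long enough (n ≤ every row length)
def pvShape (grid : List (List String)) : Prop :=
  ∀ row ∈ grid, (pvN grid).toNat ≤ row.length

theorem pvN_headD (grid : List (List String)) : pvN grid = ((grid.headD []).length : Int) := by
  unfold pvN; rw [PySem.List.pyGet?_zero]; cases grid <;> rfl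

-- sum over a filtered list as a sum of ite over the whole list
theorem pv_sum_filter (l : List (Int × Int)) (p : (Int × Int) → Bool) (g : (Int × Int) → Int) :
    ((l.filter p).map g).sum = (l.map (fun d => if p d then g d else 0)).sum := by
  induction l with
  | nil => rfl
  | cons a t ih => by_cases h : p a <;> simp [h, ih]

-- the comprehension-shaped live list is a filter of the coordinate product
theorem pv_flatMap_filter (grid : List (List String)) (q : Int → Int → Bool) :
    (PySem.List.pyRange 0 (grid.length : Int) 1).flatMap (fun x =>
      ((PySem.List.pyRange 0 (pvN grid) 1).filter (fun y => q x y)).map (fun y => (x, y)))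
    = (pvCoords grid).filter (fun c => q c.1 c.2) := by
  unfold pvCoords
  rw [show (PySem.List.pyRange 0 (grid.length : Int) 1 ×ˢ PySem.List.pyRange 0 (pvN grid) 1)
        = (PySem.List.pyRange 0 (grid.length : Int) 1).flatMap
            (fun x => (PySem.List.pyRange 0 (pvN grid) 1).map (Prod.mk x)) from rfl]
  rw [List.filter_flatMap]
  refine List.flatMap_congr (fun x _ => ?_)
  rw [List.filter_map]
  rfl

theorem pv_mem_liveL (grid : List (List String)) (c : Int × Int) :
    c ∈ pvLiveL grid ↔ (0 ≤ c.1 ∧ c.1 < (grid.length : Int) ∧ 0 ≤ c.2 ∧ c.2 < pvN grid ∧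
      pvCell grid c.1 c.2 = "@") := by
  obtain ⟨a, b⟩ := c
  simp [pvLiveL, pvCoords, List.mem_filter, List.mem_product, PySem.List.mem_pyRange_one]
  tauto

theorem pv_nodup_liveL (grid : List (List String)) : (pvLiveL grid).Nodup := by
  exact List.Nodup.filter _ (List.Nodup.product (PySem.List.nodup_pyRange_one _ _) (PySem.List.nodup_pyRange_one _ _))

-- A's accessible_rolls is the live list filtered by the accessibility test
theorem pv_aRolls_eq (grid : List (List String)) :
    pvARolls grid (grid.length : Int) (pvN grid)
      = (pvLiveL grid).filter (fun c => is_accessible (get_neighbors c.1 c.2 (grid.length : Int) (pvN grid)) grid) := by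
  unfold pvARolls pvLiveL
  rw [pv_flatMap_filter grid (fun x y => pvCell grid x y == "@" && is_accessible (get_neighbors x y (grid.length : Int) (pvN grid)) grid)]
  rw [List.filter_filter]
  exact List.filter_congr (fun c _ => Bool.and_comm _ _)

-- A's neighbour count and B's membership count agree when live has the live-cell membership
theorem pv_acc_eq (grid : List (List String)) (live : List (Int × Int))
    (hm : ∀ p : Int × Int, p ∈ live ↔ (0 ≤ p.1 ∧ p.1 < (grid.length : Int) ∧ 0 ≤ p.2 ∧ p.2 < pvN grid ∧ pvCell grid p.1 p.2 = "@"))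
    (x y : Int) :
    is_accessible (get_neighbors x y (grid.length : Int) (pvN grid)) grid
      = decide (((pvOffs.map (fun d =>
          if PySem.Set.contains live (x + d.1, y + d.2) then (1 : Int) else 0)).sum) < 4) := by
  unfold is_accessible get_neighbors pvOffs
  rw [List.map_map, pv_sum_filter]
  refine congrArg (fun s : Int => decide (s < 4)) (congrArg List.sum ?_)
  refine List.map_congr_left (fun d _ => ?_)
  simp only [Function.comp_apply]
  by_cases hc : (x + d.1, y + d.2) ∈ live
  · obtain ⟨b1, b2, b3, b4, hcell⟩ := (hm _).mp hc
    have hct : PySem.Set.contains live (x + d.1, y + d.2) = true := (PySem.Set.contains_iff live _).mpr hc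
    have hb : (decide (0 ≤ x + d.1) && decide (x + d.1 < (grid.length : Int)) &&
        decide (0 ≤ y + d.2) && decide (y + d.2 < pvN grid)) = true := by
      simp [b1, b2, b3, b4]
    simp [hb, hcell, hc]
  · have hr : ¬ (PySem.Set.contains live (x + d.1, y + d.2) = true) := by simpa using hc
    rw [if_neg hr]
    split_ifs with h1 h2
    · exfalso
      apply hc
      rw [hm]
      simp only [Bool.and_eq_true, decide_eq_true_eq] at h1
      exact ⟨h1.1.1.1, h1.1.1.2, h1.1.2, h1.2, by simpa using h2⟩
    · rfl
    · rfl

-- row lengths are preserved by one in-range dot-write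
theorem pv_shape_setDot (grid : List (List String)) (c : Int × Int)
    (h1 : 0 ≤ c.1) (h2 : c.1 < (grid.length : Int)) :
    (pvSetDot grid c).length = grid.length ∧ (pvSetDot grid c).map List.length = grid.map List.length := by
  have hlt : c.1.toNat < grid.length := by omega
  unfold pvSetDot
  rw [PySem.List.pySetD_of_nonneg _ _ h1,
      PySem.List.pyGetD_eq_getElem _ _ h1 (by simpa using h2)]
  refine ⟨by simp, ?_⟩
  rw [List.map_set, PySem.List.length_pySetD,
      show grid[c.1.toNat].length = (grid.map List.length)[c.1.toNat]'(by simpa using hlt) from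
        (List.getElem_map _).symm,
      List.set_getElem_self]

theorem pv_cell_eq (grid : List (List String)) (x y : Int) (hx : 0 ≤ x) (hy : 0 ≤ y) :
    pvCell grid x y = ((grid[x.toNat]?.getD [])[y.toNat]?).getD "" := by
  unfold pvCell
  rw [PySem.List.pyGet?_of_nonneg _ hx, PySem.List.pyGet?_of_nonneg _ hy]

-- a cell after one in-range dot-write
theorem pv_cell_setDot (grid : List (List String)) (c : Int × Int) (x y : Int)
    (hsh : pvShape grid)
    (h1 : 0 ≤ c.1) (h2 : c.1 < (grid.length : Int)) (h3 : 0 ≤ c.2) (h4 : c.2 < pvN grid)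
    (hx : 0 ≤ x) (hy : 0 ≤ y) :
    pvCell (pvSetDot grid c) x y = if c.1 = x ∧ c.2 = y then "." else pvCell grid x y := by
  have hltA : c.1.toNat < grid.length := by omega
  have hrow : PySem.List.pyGetD grid c.1 [] = grid[c.1.toNat] :=
    PySem.List.pyGetD_eq_getElem _ _ h1 (by simpa using h2)
  have hbrow : c.2.toNat < grid[c.1.toNat].length := by
    have := hsh _ (grid.getElem_mem hltA)
    omega
  unfold pvSetDot
  rw [hrow, PySem.List.pySetD_of_nonneg _ _ h1, PySem.List.pySetD_of_nonneg _ _ h3,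
      pv_cell_eq _ x y hx hy, pv_cell_eq grid x y hx hy, List.getElem?_set]
  by_cases hax : c.1.toNat = x.toNat
  · rw [if_pos hax, if_pos hltA, Option.getD_some, List.getElem?_set]
    by_cases hby : c.2.toNat = y.toNat
    · rw [if_pos hby, if_pos hbrow, if_pos ⟨by omega, by omega⟩]
      rfl
    · have hni : ¬(c.1 = x ∧ c.2 = y) := fun h => hby (by omega)
      rw [if_neg hby, if_neg hni]
      have hgx : grid[x.toNat]? = some grid[c.1.toNat] := by
        rw [← hax]
        exact List.getElem?_eq_getElem hltA
      rw [hgx, Option.getD_some]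
  · have hni : ¬(c.1 = x ∧ c.2 = y) := fun h => hax (by omega)
    rw [if_neg hax, if_neg hni]

-- pvN and row-length lower bounds only depend on the row-length profile
theorem pv_pvN_of_mapLen (g g' : List (List String))
    (h : g'.map List.length = g.map List.length) : pvN g' = pvN g := by
  have h0 := congrArg (fun l => l[0]?) h
  simp only [List.getElem?_map] at h0
  unfold pvN
  rw [PySem.List.pyGet?_zero, PySem.List.pyGet?_zero]
  cases hg' : g'[0]? <;> cases hg : g[0]? <;> simp_all

theorem pv_shape_of_mapLen (g g' : List (List String))
    (h : g'.map List.length = g.map List.length) (hsh : pvShape g) : pvShape g' := by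
  intro row hr
  have hmem : row.length ∈ g'.map List.length := List.mem_map_of_mem hr
  rw [h] at hmem
  obtain ⟨r, hrg, hlen⟩ := List.mem_map.mp hmem
  rw [pv_pvN_of_mapLen g g' h, ← hlen]
  exact hsh r hrg

-- shape facts and cells after the whole removal pass
theorem pv_foldl_master (rolls : List (Int × Int)) : ∀ grid : List (List String), pvShape grid →
    (∀ c ∈ rolls, 0 ≤ c.1 ∧ c.1 < (grid.length : Int) ∧ 0 ≤ c.2 ∧ c.2 < pvN grid) →
    (rolls.foldl pvSetDot grid).length = grid.length ∧
    (rolls.foldl pvSetDot grid).map List.length = grid.map List.length ∧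
    (∀ x y : Int, 0 ≤ x → 0 ≤ y →
      pvCell (rolls.foldl pvSetDot grid) x y = if (x, y) ∈ rolls then "." else pvCell grid x y) := by
  induction rolls with
  | nil => exact fun grid _ _ => ⟨rfl, rfl, fun x y _ _ => by simp⟩
  | cons c rs ih =>
    intro grid hsh hin
    obtain ⟨h1, h2, h3, h4⟩ := hin c (List.mem_cons_self ..)
    have hstep := pv_shape_setDot grid c h1 h2
    have hsh' : pvShape (pvSetDot grid c) := pv_shape_of_mapLen grid _ hstep.2 hsh
    have hN' : pvN (pvSetDot grid c) = pvN grid := pv_pvN_of_mapLen grid _ hstep.2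
    have hin' : ∀ c' ∈ rs, 0 ≤ c'.1 ∧ c'.1 < ((pvSetDot grid c).length : Int) ∧
        0 ≤ c'.2 ∧ c'.2 < pvN (pvSetDot grid c) := by
      intro c' hc'
      have := hin c' (List.mem_cons_of_mem _ hc')
      rw [hstep.1, hN']
      exact this
    obtain ⟨ihl, ihm, ihc⟩ := ih (pvSetDot grid c) hsh' hin'
    refine ⟨?_, ?_, ?_⟩
    · rw [List.foldl_cons, ihl, hstep.1]
    · rw [List.foldl_cons, ihm, hstep.2]
    · intro x y hx hy
      rw [List.foldl_cons, ihc x y hx hy, pv_cell_setDot grid c x y hsh h1 h2 h3 h4 hx hy]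
      by_cases hrs : (x, y) ∈ rs
      · simp [hrs]
      · by_cases hcx : c.1 = x ∧ c.2 = y
        · have hceq : c = (x, y) := by
            obtain ⟨cx, cy⟩ := c
            simp_all
          simp [hrs, hceq]
        · have hne : (x, y) ≠ c := by
            rintro rfl
            exact hcx ⟨rfl, rfl⟩
          simp [hrs, hcx, hne]

-- the live list after the removal pass is the old one minus the removed cells
theorem pv_liveL_foldl (grid : List (List String)) (rolls : List (Int × Int))
    (hsh : pvShape grid)
    (hsub : ∀ c ∈ rolls, c ∈ pvLiveL grid) :
    pvLiveL (rolls.foldl pvSetDot grid) = (pvLiveL grid).filter (fun c => !(decide (c ∈ rolls))) := by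
  have hin : ∀ c ∈ rolls, 0 ≤ c.1 ∧ c.1 < (grid.length : Int) ∧ 0 ≤ c.2 ∧ c.2 < pvN grid := by
    intro c hc
    have h := (pv_mem_liveL grid c).mp (hsub c hc)
    exact ⟨h.1, h.2.1, h.2.2.1, h.2.2.2.1⟩
  obtain ⟨hl, hm, hcell⟩ := pv_foldl_master rolls grid hsh hin
  have hN' := pv_pvN_of_mapLen grid _ hm
  unfold pvLiveL pvCoords
  rw [hl, hN']
  rw [List.filter_filter]
  refine List.filter_congr (fun c hc => ?_)
  obtain ⟨a, b⟩ := c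
  have hab := (List.mem_product.mp hc)
  rw [PySem.List.mem_pyRange_one, PySem.List.mem_pyRange_one] at hab
  rw [hcell a b hab.1.1 hab.2.1]
  by_cases hr : (a, b) ∈ rolls
  · simp [hr]
  · simp [hr]

-- the main induction: with the same fuel, B's loop tracks A's recursion
theorem pv_main (fuel : Nat) : ∀ (grid : List (List String)) (total : Int),
    pvShape grid →
    pvBLoop (pvLiveL grid) total fuel = total + pvARec grid fuel := by
  induction fuel with
  | zero => intro grid total _; simp [pvBLoop, pvARec]
  | succ fuel ih =>
    intro grid total hsh
    rw [pvBLoop, pvARec]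
    rw [show (((PySem.List.pyGet? grid 0).getD []).length : Int) = pvN grid from rfl]
    have hrem : pvBRemovable (pvLiveL grid) = pvARolls grid (grid.length : Int) (pvN grid) := by
      unfold pvBRemovable
      rw [PySem.Set.ofList_eq_self_of_nodup _ (List.Nodup.filter _ (pv_nodup_liveL grid))]
      rw [pv_aRolls_eq grid]
      refine List.filter_congr (fun c _ => ?_)
      exact (pv_acc_eq grid (pvLiveL grid) (pv_mem_liveL grid) c.1 c.2).symm
    rw [hrem]
    by_cases hem : pvARolls grid (grid.length : Int) (pvN grid) = []
    · simp [hem]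
    · have hsub : ∀ c ∈ pvARolls grid (grid.length : Int) (pvN grid), c ∈ pvLiveL grid := by
        intro c hc
        rw [pv_aRolls_eq grid] at hc
        exact (List.mem_filter.mp hc).1
      have hdiff : PySem.Set.diff (pvLiveL grid) (pvARolls grid (grid.length : Int) (pvN grid))
          = pvLiveL ((pvARolls grid (grid.length : Int) (pvN grid)).foldl pvSetDot grid) := by
        rw [pv_liveL_foldl grid _ hsh hsub]
        refine (List.filter_congr (fun c _ => ?_)).symm
        simp [PySem.Set.contains]
      have hsh' : pvShape ((pvARolls grid (grid.length : Int) (pvN grid)).foldl pvSetDot grid) := by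
        have hin : ∀ c ∈ pvARolls grid (grid.length : Int) (pvN grid),
            0 ≤ c.1 ∧ c.1 < (grid.length : Int) ∧ 0 ≤ c.2 ∧ c.2 < pvN grid := by
          intro c hc
          have h := (pv_mem_liveL grid c).mp (hsub c hc)
          exact ⟨h.1, h.2.1, h.2.2.1, h.2.2.2.1⟩
        exact pv_shape_of_mapLen grid _ (pv_foldl_master _ grid hsh hin).2.1 hsh
      rw [if_neg (by simpa using hem), hdiff, ih _ _ hsh']
      have hpos : ((pvARolls grid (grid.length : Int) (pvN grid)).length : Int) > 0 := by
        have := List.length_pos_of_ne_nil hem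
        omega
      rw [if_pos hpos]
      have hlen : PySem.Set.len (pvARolls grid (grid.length : Int) (pvN grid))
          = ((pvARolls grid (grid.length : Int) (pvN grid)).length : Int) := rfl
      rw [hlen]
      ring

-- B's loop does not depend on the fuel once the fuel exceeds the live count
theorem pv_fuel_congr (f1 : Nat) : ∀ (f2 : Nat) (live : PySem.Set (Int × Int)) (total : Int),
    live.length < f1 → live.length < f2 →
    pvBLoop live total f1 = pvBLoop live total f2 := by
  induction f1 with
  | zero => intro f2 live total h1 _; omega
  | succ f1 ih =>
    intro f2 live total h1 h2
    match f2, h2 with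
    | f2 + 1, h2 =>
      rw [pvBLoop, pvBLoop]
      by_cases hem : (pvBRemovable live).isEmpty
      · simp [hem]
      · rw [if_neg hem, if_neg hem]
        have hsubl : (PySem.Set.diff live (pvBRemovable live)).length < live.length := by
          obtain ⟨c, hcmem⟩ := List.exists_mem_of_ne_nil _ (by simpa [List.isEmpty_iff] using hem)
          have hcl : c ∈ live := by
            have hcf := (PySem.Set.mem_ofList _ _).mp hcmem
            exact (List.mem_filter.mp hcf).1
          exact List.length_filter_lt_length_iff_exists.mpr ⟨c, hcl, by simp [hcmem]⟩
        exact ih f2 _ _ (by omega) (by omega)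

theorem pv_liveL_len (grid : List (List String)) :
    (pvLiveL grid).length ≤ grid.length * (grid.headD []).length := by
  calc (pvLiveL grid).length ≤ (pvCoords grid).length := List.length_filter_le _ _
  _ = grid.length * (grid.headD []).length := by
      rw [pvCoords, List.length_product, PySem.List.length_pyRange_one,
          PySem.List.length_pyRange_one, pvN_headD]
      simp

-- ===== VERDICT (by name: the statement is the Claim_ definition above) =====
theorem part_2_spec : Claim_equal_part_2 := by
  intro grid _ hpre
  simp only [Spec_part_2, part_2, part_2_alt]
  have hsh : pvShape grid := by
    intro row hr
    rw [pvN_headD]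
    simpa using hpre.2 row hr
  rw [show (((PySem.List.pyGet? grid 0).getD []).length : Int) = pvN grid from rfl]
  rw [pv_flatMap_filter grid (fun x y => pvCell grid x y == "@")]
  rw [show List.filter (fun c => pvCell grid c.1 c.2 == "@") (pvCoords grid) = pvLiveL grid from rfl,
      PySem.Set.ofList_eq_self_of_nodup _ (pv_nodup_liveL grid)]
  rw [pv_fuel_congr ((pvLiveL grid).length + 1) (grid.length * (grid.headD []).length + 1)
      (pvLiveL grid) 0 (by omega) (by have := pv_liveL_len grid; omega)]
  rw [pv_main _ grid 0 hsh]
  omega
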